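-- pv_equiv track=rewrite | github.com/traviscrawford85/nlp_agent | main.py | _extract_operation_type
-- ===== SOURCE A (Python) =====
-- def _extract_operation_type(query: str) -> str:
--     """Extract the type of operation from the query."""
--     query_lower = query.lower()
--
--     if any(word in query_lower for word in ["create", "add", "new"]):
--         if "contact" in query_lower:
--             return "create_contact"
--         elif "matter" in query_lower:
--             return "create_matter"
--         elif "activity" in query_lower or "time" in query_lower:
--             return "create_activity"
--         else:
--             return "create"
--     elif any(word in query_lower for word in ["find", "search", "get", "list", "show"]):
--         return "search"
--     elif any(word in query_lower for word in ["update", "change", "modify"]):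
--         return "update"
--     elif any(word in query_lower for word in ["delete", "remove"]):
--         return "delete"
--     else:
--         return "unknown"
-- ===== SOURCE B (Python) =====
-- _TRIGGER_PRIORITY = {
--     "create": 0, "add": 0, "new": 0,
--     "find": 1, "search": 1, "get": 1, "list": 1, "show": 1,
--     "update": 2, "change": 2, "modify": 2,
--     "delete": 3, "remove": 3,
-- }
-- _SUB_PRIORITY = {"contact": 0, "matter": 1, "activity": 2, "time": 2}
-- _ALL_WORDS = list(_TRIGGER_PRIORITY) + list(_SUB_PRIORITY)
-- _CATEGORY_LABELS = ["create", "search", "update", "delete", "unknown"]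
-- _SUB_LABELS = ["create_contact", "create_matter", "create_activity", "create"]
--
--
-- def _extract_operation_type(query: str) -> str:
--     """Extract the type of operation from the query.
--
--     Single left-to-right scan of the query collecting the set of keywords
--     that occur, then min-priority aggregation instead of an if/elif chain.
--     """
--     q = query.lower()
--     found = set()
--     for i in range(len(q)):
--         for w in _ALL_WORDS:
--             if w not in found and q.startswith(w, i):
--                 found.add(w)
--     best = min((p for w, p in _TRIGGER_PRIORITY.items() if w in found), default=4)
--     if best == 0:
--         sub = min((p for w, p in _SUB_PRIORITY.items() if w in found), default=3)
--         return _SUB_LABELS[sub]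
--     return _CATEGORY_LABELS[best]
-- ===== Notes on version B (the rewrite author's own statement) =====
-- stated objective: alternative
-- what changed: Replaced A's chain of independent substring tests (one 'in' search per keyword, hard-coded if/elif branches) by a single left-to-right scan of the query that collects the set of occurring keywords, followed by a min-priority aggregation over keyword tables instead of branch order.
import Mathlib
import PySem

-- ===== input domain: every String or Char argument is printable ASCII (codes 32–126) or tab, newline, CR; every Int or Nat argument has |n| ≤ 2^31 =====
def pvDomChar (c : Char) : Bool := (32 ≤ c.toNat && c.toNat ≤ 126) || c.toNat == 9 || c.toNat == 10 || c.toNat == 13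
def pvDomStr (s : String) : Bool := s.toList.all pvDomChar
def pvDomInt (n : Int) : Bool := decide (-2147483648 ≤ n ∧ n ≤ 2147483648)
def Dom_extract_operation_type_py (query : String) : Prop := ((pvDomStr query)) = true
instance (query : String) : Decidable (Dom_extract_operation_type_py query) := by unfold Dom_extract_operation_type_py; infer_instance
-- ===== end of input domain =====

-- B replaces A's chain of substring tests by a single left-to-right scan that collects
-- the set of keywords occurring in the query, then a min-priority aggregation (alternative decomposition, same cost class).

-- ===== PORT A =====
def extract_operation_type_py (query : String) : String :=
  let query_lower := PySem.Str.lower query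
  if ["create", "add", "new"].any (fun w => PySem.Str.isIn w query_lower) then
    if PySem.Str.isIn "contact" query_lower then "create_contact"
    else if PySem.Str.isIn "matter" query_lower then "create_matter"
    else if PySem.Str.isIn "activity" query_lower || PySem.Str.isIn "time" query_lower then "create_activity"
    else "create"
  else if ["find", "search", "get", "list", "show"].any (fun w => PySem.Str.isIn w query_lower) then "search"
  else if ["update", "change", "modify"].any (fun w => PySem.Str.isIn w query_lower) then "update"
  else if ["delete", "remove"].any (fun w => PySem.Str.isIn w query_lower) then "delete"
  else "unknown"

-- ===== PORT B =====
-- the module-level tables of Source B (dicts of string → small int, in insertion order)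
def pvTriggerPriority : List (String × Nat) :=
  [("create", 0), ("add", 0), ("new", 0),
   ("find", 1), ("search", 1), ("get", 1), ("list", 1), ("show", 1),
   ("update", 2), ("change", 2), ("modify", 2),
   ("delete", 3), ("remove", 3)]
def pvSubPriority : List (String × Nat) :=
  [("contact", 0), ("matter", 1), ("activity", 2), ("time", 2)]
def pvAllWords : List String := pvTriggerPriority.map Prod.fst ++ pvSubPriority.map Prod.fst
def pvCategoryLabels : List String := ["create", "search", "update", "delete", "unknown"]
def pvSubLabels : List String := ["create_contact", "create_matter", "create_activity", "create"]

-- inner loop body: 'if w not in found and q.startswith(w, i): found.add(w)'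
-- q.startswith(w, i) with 0 ≤ i is exact as: w.toList is a prefix of q.toList.drop i
def pvScanStep (ql : List Char) (i : Nat) (s : PySem.Set String) (w : String) : PySem.Set String :=
  if ¬ PySem.Set.contains s w ∧ PySem.Chars.startswith (ql.drop i) w.toList then PySem.Set.add s w else s

-- 'for i in range(len(q)): for w in _ALL_WORDS: …'  (i from pyRange is ≥ 0, so .toNat is exact)
def pvScan (ql : List Char) : PySem.Set String :=
  (PySem.List.pyRange 0 ql.length 1).foldl
    (fun s i => pvAllWords.foldl (fun s w => pvScanStep ql i.toNat s w) s) PySem.Set.empty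

-- 'min((p for w, p in d.items() if w in found), default=dflt)'
def pvMinFound (found : PySem.Set String) (d : List (String × Nat)) (dflt : Nat) : Nat :=
  match PySem.List.min? (d.filterMap (fun wp => if PySem.Set.contains found wp.1 then some wp.2 else none)) (fun p => p) with
  | some m => m
  | none => dflt

def extract_operation_type_py_alt (query : String) : String :=
  let q := PySem.Str.lower query
  let found := pvScan q.toList
  let best := pvMinFound found pvTriggerPriority 4
  if best = 0 then
    let sub := pvMinFound found pvSubPriority 3
    (PySem.List.pyGet? pvSubLabels sub).getD ""
  else
    (PySem.List.pyGet? pvCategoryLabels best).getD ""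

-- ===== PRECONDITION & SPEC =====
def Spec_extract_operation_type_py (query : String) (out : String) : Prop := out = extract_operation_type_py_alt query
instance (query : String) (out : String) : Decidable (Spec_extract_operation_type_py query out) := by unfold Spec_extract_operation_type_py; infer_instance

-- ===== CLAIM (what is proved, stated in full; the proofs are below) =====
def Claim_equal_extract_operation_type_py : Prop := ∀ (query : String), Dom_extract_operation_type_py query → Spec_extract_operation_type_py query (extract_operation_type_py query)

-- ===== LEMMAS AND PROOFS =====

-- membership through one guarded-add step
theorem pv_mem_scanStep (ql : List Char) (i : Nat) (s : PySem.Set String) (w y : String) :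
    y ∈ pvScanStep ql i s w ↔ y ∈ s ∨ (y = w ∧ PySem.Chars.startswith (ql.drop i) w.toList = true) := by
  unfold pvScanStep
  split_ifs with h
  · rw [PySem.Set.mem_add]
    constructor
    · rintro (hy | hy)
      · exact Or.inl hy
      · exact Or.inr ⟨hy, h.2⟩
    · rintro (hy | hy)
      · exact Or.inl hy
      · exact Or.inr hy.1
  · constructor
    · exact Or.inl
    · rintro (hy | ⟨rfl, hsw⟩)
      · exact hy
      · rcases not_and_or.mp h with hc | hc
        · exact (PySem.Set.contains_iff s y).mp (by simpa using hc)
        · exact absurd hsw hc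

-- membership after the inner word loop
theorem pv_mem_inner (ql : List Char) (i : Nat) (words : List String) (s : PySem.Set String) (y : String) :
    y ∈ words.foldl (fun s w => pvScanStep ql i s w) s ↔
      y ∈ s ∨ (y ∈ words ∧ PySem.Chars.startswith (ql.drop i) y.toList = true) := by
  induction words generalizing s with
  | nil => simp
  | cons w ws ih =>
    simp only [List.foldl_cons, ih, pv_mem_scanStep, List.mem_cons]
    constructor
    · rintro ((hy | ⟨rfl, hsw⟩) | ⟨hy, hsw⟩)
      · exact Or.inl hy
      · exact Or.inr ⟨Or.inl rfl, hsw⟩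
      · exact Or.inr ⟨Or.inr hy, hsw⟩
    · rintro (hy | ⟨hy | hy, hsw⟩)
      · exact Or.inl (Or.inl hy)
      · exact Or.inl (Or.inr ⟨hy, by simpa [hy] using hsw⟩)
      · exact Or.inr ⟨hy, hsw⟩

-- membership after the outer index loop, for any index list
theorem pv_mem_outer (ql : List Char) (L : List Int) (s : PySem.Set String) (y : String) :
    y ∈ L.foldl (fun s i => pvAllWords.foldl (fun s w => pvScanStep ql i.toNat s w) s) s ↔
      y ∈ s ∨ (y ∈ pvAllWords ∧ ∃ i ∈ L, PySem.Chars.startswith (ql.drop i.toNat) y.toList = true) := by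
  induction L generalizing s with
  | nil => simp
  | cons i L ih =>
    simp only [List.foldl_cons, ih, pv_mem_inner, List.mem_cons]
    constructor
    · rintro ((hy | ⟨hw, hsw⟩) | ⟨hw, j, hj, hsw⟩)
      · exact Or.inl hy
      · exact Or.inr ⟨hw, i, Or.inl rfl, hsw⟩
      · exact Or.inr ⟨hw, j, Or.inr hj, hsw⟩
    · rintro (hy | ⟨hw, j, (rfl | hj), hsw⟩)
      · exact Or.inl (Or.inl hy)
      · exact Or.inl (Or.inr ⟨hw, hsw⟩)
      · exact Or.inr ⟨hw, j, hj, hsw⟩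

-- the scan set answers exactly 'w in q' for each (nonempty) table word
theorem pv_contains_isIn (ql : List Char) (w : String) (hw : w ∈ pvAllWords) (hne : w.toList ≠ []) :
    PySem.Set.contains (pvScan ql) w = PySem.Chars.isIn w.toList ql := by
  have hmem : w ∈ pvScan ql ↔ ∃ j, w.toList <+: ql.drop j := by
    unfold pvScan
    rw [pv_mem_outer]
    simp only [PySem.Set.empty, List.not_mem_nil, false_or, hw, true_and]
    constructor
    · rintro ⟨i, _, hsw⟩
      exact ⟨i.toNat, (PySem.Chars.startswith_iff _ _).mp hsw⟩
    · rintro ⟨j, hpre⟩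
      have hj : j < ql.length := by
        by_contra hge
        push Not at hge
        rw [List.drop_eq_nil_of_le hge] at hpre
        exact hne (List.prefix_nil.mp hpre)
      refine ⟨(j : Int), ?_, ?_⟩
      · rw [PySem.List.mem_pyRange_one]
        constructor
        · exact Int.natCast_nonneg j
        · exact_mod_cast hj
      · rw [Int.toNat_natCast]
        exact (PySem.Chars.startswith_iff _ _).mpr hpre
  by_cases h : PySem.Chars.isIn w.toList ql = true
  · rw [h]
    exact (PySem.Set.contains_iff _ _).mpr (hmem.mpr ((PySem.Chars.exists_prefix_drop_iff_isIn w.toList ql).mpr h))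
  · rw [Bool.not_eq_true] at h
    rw [h, ← Bool.not_eq_true, PySem.Set.contains_iff, hmem]
    intro hex
    have ht := (PySem.Chars.exists_prefix_drop_iff_isIn w.toList ql).mp hex
    rw [h] at ht
    exact absurd ht (by decide)

-- foldl-min shifts over a pending minimum
theorem pv_foldl_min_shift (t : List Nat) : ∀ (a b : Nat), t.foldl min (min a b) = min a (t.foldl min b) := by
  induction t with
  | nil => intro a b; rfl
  | cons c t ih =>
    intro a b
    simp only [List.foldl_cons, Nat.min_assoc, ih]

-- 'min((p for w,p in table if w in found), default=dflt)' as a right fold, when dflt bounds the priorities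
theorem pv_minFound_eq (found : PySem.Set String) (table : List (String × Nat)) (dflt : Nat)
    (hb : ∀ wp ∈ table, wp.2 ≤ dflt) :
    pvMinFound found table dflt =
      table.foldr (fun wp acc => if PySem.Set.contains found wp.1 then min wp.2 acc else acc) dflt := by
  induction table with
  | nil => rfl
  | cons wp rest ih =>
    have hrest : ∀ q ∈ rest, q.2 ≤ dflt := fun q hq => hb q (List.mem_cons_of_mem _ hq)
    have hp : wp.2 ≤ dflt := hb wp (List.mem_cons_self)
    rw [List.foldr_cons, ← ih hrest]
    cases hc : PySem.Set.contains found wp.1 with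
    | false =>
      simp only [pvMinFound, List.filterMap_cons, hc, Bool.false_eq_true, if_false]
    | true =>
      simp only [pvMinFound, List.filterMap_cons, hc, if_true]
      cases hL : rest.filterMap (fun wp => if PySem.Set.contains found wp.1 = true then some wp.2 else none) with
      | nil =>
        simp only [PySem.List.min?, List.foldl_cons, List.foldl_nil]
        omega
      | cons x t =>
        simp only [PySem.List.min?_id_cons, List.foldl_cons]
        exact pv_foldl_min_shift t wp.2 x

-- minimum of a priority fold over boolean flags, as a first-true-group chain
set_option maxHeartbeats 1000000 in
theorem pv_best_core (b1 b2 b3 b4 b5 b6 b7 b8 b9 b10 b11 b12 b13 : Bool) :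
    List.foldr (fun (pb : Bool × Nat) acc => if pb.1 = true then min pb.2 acc else acc) 4
      [(b1,0),(b2,0),(b3,0),(b4,1),(b5,1),(b6,1),(b7,1),(b8,1),(b9,2),(b10,2),(b11,2),(b12,3),(b13,3)] =
    (if b1 || (b2 || b3) then 0
     else if b4 || (b5 || (b6 || (b7 || b8))) then 1
     else if b9 || (b10 || b11) then 2
     else if b12 || b13 then 3
     else 4) := by
  revert b1 b2 b3 b4 b5 b6 b7 b8 b9 b10 b11 b12 b13
  decide

-- the trigger-table minimum is the first matching category group
theorem pv_best_val (found : PySem.Set String) :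
    pvMinFound found pvTriggerPriority 4 =
      (if PySem.Set.contains found "create" || (PySem.Set.contains found "add" || PySem.Set.contains found "new") then 0
       else if PySem.Set.contains found "find" || (PySem.Set.contains found "search" || (PySem.Set.contains found "get" || (PySem.Set.contains found "list" || PySem.Set.contains found "show"))) then 1
       else if PySem.Set.contains found "update" || (PySem.Set.contains found "change" || PySem.Set.contains found "modify") then 2
       else if PySem.Set.contains found "delete" || PySem.Set.contains found "remove" then 3
       else 4) := by
  have hmap : [(PySem.Set.contains found "create", (0:Nat)), (PySem.Set.contains found "add", 0), (PySem.Set.contains found "new", 0),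
          (PySem.Set.contains found "find", 1), (PySem.Set.contains found "search", 1), (PySem.Set.contains found "get", 1),
          (PySem.Set.contains found "list", 1), (PySem.Set.contains found "show", 1),
          (PySem.Set.contains found "update", 2), (PySem.Set.contains found "change", 2), (PySem.Set.contains found "modify", 2),
          (PySem.Set.contains found "delete", 3), (PySem.Set.contains found "remove", 3)]
        = pvTriggerPriority.map (fun wp => (PySem.Set.contains found wp.1, wp.2)) := by simp [pvTriggerPriority]
  rw [pv_minFound_eq _ _ _ (by decide),
    ← pv_best_core (PySem.Set.contains found "create") (PySem.Set.contains found "add") (PySem.Set.contains found "new")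
      (PySem.Set.contains found "find") (PySem.Set.contains found "search") (PySem.Set.contains found "get")
      (PySem.Set.contains found "list") (PySem.Set.contains found "show")
      (PySem.Set.contains found "update") (PySem.Set.contains found "change") (PySem.Set.contains found "modify")
      (PySem.Set.contains found "delete") (PySem.Set.contains found "remove"),
    hmap, List.foldr_map]

-- the sub-table minimum is the first matching create refinement
theorem pv_sub_val (found : PySem.Set String) :
    pvMinFound found pvSubPriority 3 =
      (if PySem.Set.contains found "contact" then 0
       else if PySem.Set.contains found "matter" then 1
       else if PySem.Set.contains found "activity" || PySem.Set.contains found "time" then 2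
       else 3) := by
  rw [pv_minFound_eq _ _ _ (by decide)]
  simp only [pvSubPriority, List.foldr_cons, List.foldr_nil]
  generalize PySem.Set.contains found "contact" = b1
  generalize PySem.Set.contains found "matter" = b2
  generalize PySem.Set.contains found "activity" = b3
  generalize PySem.Set.contains found "time" = b4
  revert b1 b2 b3 b4
  decide

-- ===== VERDICT (by name: the statement is the Claim_ definition above) =====
set_option maxHeartbeats 1000000 in
theorem extract_operation_type_py_spec : Claim_equal_extract_operation_type_py := by
  intro query _
  unfold Spec_extract_operation_type_py
  have H := pv_contains_isIn (PySem.Str.lower query).toList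
  simp only [extract_operation_type_py, extract_operation_type_py_alt,
    PySem.Str.isIn_eq, List.any_cons, List.any_nil, Bool.or_false]
  rw [pv_best_val, pv_sub_val]
  simp only [H "create" (by decide) (by decide), H "add" (by decide) (by decide), H "new" (by decide) (by decide),
    H "find" (by decide) (by decide), H "search" (by decide) (by decide), H "get" (by decide) (by decide),
    H "list" (by decide) (by decide), H "show" (by decide) (by decide),
    H "update" (by decide) (by decide), H "change" (by decide) (by decide), H "modify" (by decide) (by decide),
    H "delete" (by decide) (by decide), H "remove" (by decide) (by decide),
    H "contact" (by decide) (by decide), H "matter" (by decide) (by decide),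
    H "activity" (by decide) (by decide), H "time" (by decide) (by decide)]
  split_ifs <;> simp_all [pvSubLabels, pvCategoryLabels, PySem.List.pyGet?, PySem.List.pyIdx?]
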